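-- pv_equiv track=rewrite | github.com/andrew-semenyuk/test_work | ex1.py | check
-- ===== SOURCE A (Python) =====
-- def check(x):
--     x = x.lower()
--     c = True
--     left = 0
--     right = len(x) - 1
--     while left <= right:
--         if not x[right].isalpha():
--             right -= 1
--         elif not x[left].isalpha():
--            left += 1
--         else:
--             if x[left] == x[right]:
--                 c = True
--                 right -= 1
--                 left += 1
--             else:
--                 c = False
--                 break
--     return c
-- ===== SOURCE B (Python) =====
-- def check(x):
--     letters = [ch for ch in x.lower() if ch.isalpha()]
--     return letters == letters[::-1]
-- ===== Notes on version B (the rewrite author's own statement) =====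
-- stated objective: simpler
-- what changed: Replaces A's interleaved two-pointer skip-and-compare while loop with a build-then-compare decomposition: filter the lowered string's letters in one pass, then compare the list with its reverse.
import Mathlib
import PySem

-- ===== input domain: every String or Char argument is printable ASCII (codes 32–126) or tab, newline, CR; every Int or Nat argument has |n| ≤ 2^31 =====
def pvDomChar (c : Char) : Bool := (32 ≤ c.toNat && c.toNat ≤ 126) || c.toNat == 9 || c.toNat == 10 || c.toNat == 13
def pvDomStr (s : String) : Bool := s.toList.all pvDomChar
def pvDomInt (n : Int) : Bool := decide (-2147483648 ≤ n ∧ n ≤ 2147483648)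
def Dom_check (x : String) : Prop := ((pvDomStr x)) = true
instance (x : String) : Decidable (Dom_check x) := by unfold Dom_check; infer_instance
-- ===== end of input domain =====

-- B replaces A's two-pointer skip-and-compare loop by filter-the-letters-then-compare-with-reverse (simpler decomposition).

-- ===== PORT A =====
-- the while loop of A; indices are always in range when the loop is entered from check,
-- so the `none` (IndexError) branches are unreachable there
def checkLoopA (xs : List Char) (left right : Int) (c : Bool) : Bool :=
  if _h : left ≤ right then
    match PySem.List.pyGet? xs right with
    | none => false
    | some cr =>
      if !(PySem.Chars.isalpha cr) then checkLoopA xs left (right - 1) c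
      else
        match PySem.List.pyGet? xs left with
        | none => false
        | some cl =>
          if !(PySem.Chars.isalpha cl) then checkLoopA xs (left + 1) right c
          else if cl == cr then checkLoopA xs (left + 1) (right - 1) true
          else false
  else c
termination_by (right + 1 - left).toNat
decreasing_by all_goals omega

def check (x : String) : Bool :=
  let xl := PySem.Str.lower x
  checkLoopA xl.toList 0 (PySem.Str.len xl - 1) true

-- ===== PORT B =====
def check_alt (x : String) : Bool :=
  let letters := (PySem.Str.lower x).toList.filter (fun ch => PySem.Chars.isalpha ch)
  letters == letters.reverse

-- ===== PRECONDITION & SPEC =====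
def Spec_check (x : String) (out : Bool) : Prop := out = check_alt x
instance (x : String) (out : Bool) : Decidable (Spec_check x out) := by unfold Spec_check; infer_instance

-- ===== CLAIM (what is proved, stated in full; the proofs are below) =====
def Claim_equal_check : Prop := ∀ (x : String), Dom_check x → Spec_check x (check x)

-- ===== LEMMAS AND PROOFS =====

-- abstract form of A's two-pointer loop, acting on the slice itself
def pvGo (s : List Char) : Bool :=
  if hs : s = [] then true
  else if !(PySem.Chars.isalpha (s.getLast hs)) then pvGo s.dropLast
  else if !(PySem.Chars.isalpha (s.head hs)) then pvGo s.tail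
  else if s.head hs == s.getLast hs then pvGo s.tail.dropLast
  else false
termination_by s.length
decreasing_by
  all_goals
    simp only [List.length_dropLast, List.length_tail]
    have := List.length_pos_of_ne_nil hs
    omega

theorem pvGo_nil : pvGo [] = true := by simp [pvGo]

theorem sandwich_iff (a b : Char) (m : List Char) :
    (a :: m ++ [b] = (a :: m ++ [b]).reverse) ↔ (a = b ∧ m = m.reverse) := by
  have hrev : (a :: m ++ [b]).reverse = b :: (m.reverse ++ [a]) := by simp
  rw [hrev]
  constructor
  · intro h
    simp only [List.cons_append, List.cons.injEq] at h
    obtain ⟨h1, h2⟩ := h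
    subst h1
    refine ⟨rfl, ?_⟩
    exact ((List.append_left_inj [a]).mp h2)
  · rintro ⟨h1, h2⟩
    subst h1
    rw [← h2]
    rfl

theorem list_beq_eq_decide (xs ys : List Char) : (xs == ys) = decide (xs = ys) := by
  by_cases h : xs = ys <;> simp [h]

-- the filtered letters of c :: t, when both end characters are letters, sandwich the middle
theorem pvFilterStruct (c : Char) (t : List Char) (ht : t ≠ [])
    (ha : PySem.Chars.isalpha c = true)
    (hb : PySem.Chars.isalpha (t.getLast ht) = true) :
    (c :: t).filter (fun ch => PySem.Chars.isalpha ch)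
      = c :: t.dropLast.filter (fun ch => PySem.Chars.isalpha ch) ++ [t.getLast ht] := by
  rw [List.filter_cons]
  simp only [ha, if_pos]
  congr 1
  conv_lhs => rw [← List.dropLast_append_getLast ht]
  rw [List.filter_append]
  simp [hb]

-- B's palindrome test on the filtered letters equals the abstract two-pointer loop
theorem pvGo_eq_pal (s : List Char) :
    pvGo s = decide ((s.filter (fun ch => PySem.Chars.isalpha ch))
      = (s.filter (fun ch => PySem.Chars.isalpha ch)).reverse) := by
  fun_induction pvGo s with
  | case1 => simp
  | case2 s hs hb ih =>
    have hb' : PySem.Chars.isalpha (s.getLast hs) = false := by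
      simpa using hb
    have hf : s.filter (fun ch => PySem.Chars.isalpha ch)
        = s.dropLast.filter (fun ch => PySem.Chars.isalpha ch) := by
      conv_lhs => rw [← List.dropLast_append_getLast hs]
      simp [List.filter_append, hb']
    rw [ih, hf]
  | case3 s hs hb ha ih =>
    cases s with
    | nil => exact absurd rfl hs
    | cons c t =>
      have ha' : PySem.Chars.isalpha c = false := by
        simpa using ha
      simp only [List.tail_cons] at ih ⊢
      rw [ih, List.filter_cons]
      simp [ha']
  | case4 s hs hb ha hab ih =>
    cases s with
    | nil => exact absurd rfl hs
    | cons c t =>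
      have ha' : PySem.Chars.isalpha c = true := by
        simpa using ha
      simp only [List.tail_cons] at ih ⊢
      by_cases ht : t = []
      · subst ht
        simp only [List.dropLast_nil] at ih ⊢
        rw [ih]
        simp [ha']
      · have hb' : PySem.Chars.isalpha (t.getLast ht) = true := by
          simpa [List.getLast_cons ht] using hb
        have hab' : c = t.getLast ht := by
          simpa [List.getLast_cons ht] using hab
        rw [ih, pvFilterStruct c t ht ha' hb',
          decide_eq_decide.mpr ((sandwich_iff c (t.getLast ht)
            (t.dropLast.filter (fun ch => PySem.Chars.isalpha ch))).trans
            (and_iff_right hab'))]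
  | case5 s hs hb ha hab =>
    cases s with
    | nil => exact absurd rfl hs
    | cons c t =>
      have ha' : PySem.Chars.isalpha c = true := by
        simpa using ha
      by_cases ht : t = []
      · subst ht
        simp [List.getLast_singleton] at hab
      · have hb' : PySem.Chars.isalpha (t.getLast ht) = true := by
          simpa [List.getLast_cons ht] using hb
        have hab' : c ≠ t.getLast ht := by
          simpa [List.getLast_cons ht] using hab
        rw [pvFilterStruct c t ht ha' hb']
        exact (decide_eq_false
          (fun hp => hab' ((sandwich_iff _ _ _).mp hp).1)).symm

-- A's indexed loop computes the abstract loop of the slice xs[l..r]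
theorem loop_eq_aux (xs : List Char) (n : Nat) : ∀ (l r : Int), 0 ≤ l →
    r < xs.length → (r + 1 - l).toNat = n →
    checkLoopA xs l r true = pvGo ((xs.drop l.toNat).take (r + 1 - l).toNat) := by
  induction n using Nat.strong_induction_on with
  | _ n ih =>
    intro l r hl hr hn
    by_cases hlr : l ≤ r
    · have hr0 : 0 ≤ r := le_trans hl hlr
      have hLl : ((l.toNat : Int)) = l := Int.toNat_of_nonneg hl
      have hRr : ((r.toNat : Int)) = r := Int.toNat_of_nonneg hr0
      have hLR : l.toNat ≤ r.toNat := by omega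
      have hRlen : r.toNat < xs.length := by omega
      have hcnt : (r + 1 - l).toNat = r.toNat + 1 - l.toNat := by omega
      have hslen : ((xs.drop l.toNat).take (r + 1 - l).toNat).length
          = r.toNat + 1 - l.toNat := by
        simp only [List.length_take, List.length_drop]
        omega
      have hsne : (xs.drop l.toNat).take (r + 1 - l).toNat ≠ [] := by
        intro h
        rw [h] at hslen
        simp at hslen
        omega
      have hidx : ∀ (i : Nat) (h1 : i < r.toNat + 1 - l.toNat),
          ((xs.drop l.toNat).take (r + 1 - l).toNat)[i]'(by omega) = xs[l.toNat + i]'(by omega) := by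
        intro i h1
        simp [List.getElem_take, List.getElem_drop]
      have hlast : ((xs.drop l.toNat).take (r + 1 - l).toNat).getLast hsne
          = xs[r.toNat]'hRlen := by
        rw [List.getLast_eq_getElem]
        rw [getElem_congr rfl (show ((xs.drop l.toNat).take (r + 1 - l).toNat).length - 1
          = r.toNat - l.toNat by omega) (by omega)]
        rw [hidx (r.toNat - l.toNat) (by omega)]
        exact getElem_congr rfl (by omega) (by omega)
      have hhead : ((xs.drop l.toNat).take (r + 1 - l).toNat).head hsne
          = xs[l.toNat]'(by omega) := by
        rw [List.head_eq_getElem]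
        rw [hidx 0 (by omega)]
        exact getElem_congr rfl (by omega) (by omega)
      have hgR : PySem.List.pyGet? xs r
          = some (((xs.drop l.toNat).take (r + 1 - l).toNat).getLast hsne) := by
        conv_lhs => rw [← hRr]
        rw [PySem.List.pyGet?_natCast, List.getElem?_eq_getElem hRlen, hlast]
      have hgL : PySem.List.pyGet? xs l
          = some (((xs.drop l.toNat).take (r + 1 - l).toNat).head hsne) := by
        conv_lhs => rw [← hLl]
        rw [PySem.List.pyGet?_natCast, List.getElem?_eq_getElem (by omega : l.toNat < xs.length), hhead]
      have hdropLast : ((xs.drop l.toNat).take (r + 1 - l).toNat).dropLast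
          = (xs.drop l.toNat).take (r - l).toNat := by
        rw [List.dropLast_eq_take, List.take_take]
        congr 1
        omega
      have htail : ((xs.drop l.toNat).take (r + 1 - l).toNat).tail
          = (xs.drop (l.toNat + 1)).take (r.toNat - l.toNat) := by
        rw [← List.drop_one, List.drop_take, List.drop_drop]
        congr 1
        omega
      have htailLen : ((xs.drop (l.toNat + 1)).take (r.toNat - l.toNat)).length
          = r.toNat - l.toNat := by
        simp only [List.length_take, List.length_drop]
        omega
      have htailDropLast : ((xs.drop l.toNat).take (r + 1 - l).toNat).tail.dropLast
          = (xs.drop (l.toNat + 1)).take (r.toNat - l.toNat - 1) := by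
        rw [htail, List.dropLast_eq_take, htailLen, List.take_take]
        congr 1
        omega
      by_cases hbA : PySem.Chars.isalpha (((xs.drop l.toNat).take (r + 1 - l).toNat).getLast hsne)
      · by_cases haA : PySem.Chars.isalpha (((xs.drop l.toNat).take (r + 1 - l).toNat).head hsne)
        · by_cases hab : (((xs.drop l.toNat).take (r + 1 - l).toNat).head hsne
              == ((xs.drop l.toNat).take (r + 1 - l).toNat).getLast hsne) = true
          · have hR : pvGo ((xs.drop l.toNat).take (r + 1 - l).toNat)
                = pvGo ((xs.drop l.toNat).take (r + 1 - l).toNat).tail.dropLast := by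
              rw [pvGo, dif_neg hsne, if_neg (by simpa using hbA),
                if_neg (by simpa using haA), if_pos hab]
            rw [checkLoopA, dif_pos hlr]
            simp only [hgR, hgL]
            rw [if_neg (by simpa using hbA), if_neg (by simpa using haA), if_pos hab, hR]
            rw [ih (r - 1 + 1 - (l + 1)).toNat (by omega) (l + 1) (r - 1) (by omega) (by omega) rfl]
            rw [htailDropLast,
              show ((l : Int) + 1).toNat = l.toNat + 1 from by omega,
              show ((r : Int) - 1 + 1 - (l + 1)).toNat = r.toNat - l.toNat - 1 from by omega]
          · have hR : pvGo ((xs.drop l.toNat).take (r + 1 - l).toNat) = false := by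
              rw [pvGo, dif_neg hsne, if_neg (by simpa using hbA),
                if_neg (by simpa using haA), if_neg hab]
            rw [checkLoopA, dif_pos hlr]
            simp only [hgR, hgL]
            rw [if_neg (by simpa using hbA), if_neg (by simpa using haA), if_neg hab, hR]
        · have hR : pvGo ((xs.drop l.toNat).take (r + 1 - l).toNat)
              = pvGo ((xs.drop l.toNat).take (r + 1 - l).toNat).tail := by
            rw [pvGo, dif_neg hsne, if_neg (by simpa using hbA), if_pos (by simpa using haA)]
          rw [checkLoopA, dif_pos hlr]
          simp only [hgR, hgL]
          rw [if_neg (by simpa using hbA), if_pos (by simpa using haA), hR]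
          rw [ih (r + 1 - (l + 1)).toNat (by omega) (l + 1) r (by omega) hr rfl]
          rw [htail,
            show ((l : Int) + 1).toNat = l.toNat + 1 from by omega,
            show ((r : Int) + 1 - (l + 1)).toNat = r.toNat - l.toNat from by omega]
      · have hR : pvGo ((xs.drop l.toNat).take (r + 1 - l).toNat)
            = pvGo ((xs.drop l.toNat).take (r + 1 - l).toNat).dropLast := by
          rw [pvGo, dif_neg hsne, if_pos (by simpa using hbA)]
        rw [checkLoopA, dif_pos hlr]
        simp only [hgR]
        rw [if_pos (by simpa using hbA), hR]
        rw [ih (r - 1 + 1 - l).toNat (by omega) l (r - 1) hl (by omega) rfl]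
        rw [hdropLast, show ((r : Int) - 1 + 1 - l).toNat = (r - l).toNat from by omega]
    · rw [checkLoopA]
      rw [dif_neg hlr]
      have h0 : (r + 1 - l).toNat = 0 := by omega
      rw [h0, List.take_zero, pvGo_nil]

theorem loop_eq (xs : List Char) (l r : Int) (hl : 0 ≤ l) (hr : r < xs.length) :
    checkLoopA xs l r true = pvGo ((xs.drop l.toNat).take (r + 1 - l).toNat) := by
  exact loop_eq_aux xs (r + 1 - l).toNat l r hl hr rfl

theorem check_spec : Claim_equal_check := by
  intro x _
  unfold Spec_check check check_alt
  simp only [PySem.Str.len_eq]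
  set xs := (PySem.Str.lower x).toList with hxs
  have h := loop_eq xs 0 ((xs.length : Int) - 1) (le_refl 0) (by omega)
  have harg : ((xs.length : Int) - 1 + 1 - 0).toNat = xs.length := by omega
  rw [harg] at h
  simp only [Int.toNat_zero, List.drop_zero, List.take_length] at h
  rw [h, pvGo_eq_pal, list_beq_eq_decide]
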